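-- pv_equiv track=rewrite | github.com/huangwb8/ChineseResearchLaTeX | skills/check-review-alignment/scripts/paragraph_analyzer.py | _sanitize_lines_for_analysis
-- ===== SOURCE A (Python) =====
-- from typing import Dict, List, Optional, Tuple
--
-- def _sanitize_lines_for_analysis(lines: List[str]) -> List[str]:
--     """
--     为引用抽取做预处理：
--     - 剔除未转义的 % 注释（避免把注释里的 \\cite{} 当作真实引用）
--     - 将 verbatim-like 环境内容置空（避免从代码块里误抽取引用）
--
--     注意：这里保持行数不变，以确保行号映射仍然可靠。
--     """
--     out: List[str] = []
--     in_verbatim = False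
--
--     for line in lines:
--         stripped = line.strip()
--
--         # 粗粒度识别 verbatim-like 环境（覆盖常见代码块环境）
--         if not in_verbatim and (
--             r"\begin{verbatim}" in stripped
--             or r"\begin{lstlisting}" in stripped
--             or r"\begin{minted}" in stripped
--         ):
--             in_verbatim = True
--             out.append("")
--             continue
--
--         if in_verbatim and (
--             r"\end{verbatim}" in stripped
--             or r"\end{lstlisting}" in stripped
--             or r"\end{minted}" in stripped
--         ):
--             in_verbatim = False
--             out.append("")
--             continue
--
--         if in_verbatim:
--             out.append("")
--             continue
--
--         out.append(_strip_latex_comment(line))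
--
--     return out
--
-- def _strip_latex_comment(line: str) -> str:
--     """
--     剔除 LaTeX 行内注释：未被转义的 '%' 之后的内容都视为注释。
--
--     规则：
--     - '\\%' 表示字面百分号，不开启注释
--     - '...\\\\%' 里 '%' 仍然是注释（连续反斜杠数为偶数时不算转义）
--     """
--     for i, ch in enumerate(line):
--         if ch != "%":
--             continue
--
--         # 统计 '%' 前连续反斜杠数量，奇数表示该 '%' 被转义。
--         bs = 0
--         j = i - 1
--         while j >= 0 and line[j] == "\\":
--             bs += 1
--             j -= 1
--         if bs % 2 == 1:
--             continue
--         return line[:i].rstrip()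
--     return line
-- ===== SOURCE B (Python) =====
-- from typing import List
--
-- _BEGIN = (r"\begin{verbatim}", r"\begin{lstlisting}", r"\begin{minted}")
-- _END = (r"\end{verbatim}", r"\end{lstlisting}", r"\end{minted}")
--
--
-- def _strip_comment(line: str) -> str:
--     # One forward pass: bs = length of the run of consecutive backslashes
--     # immediately before position i; a '%' opens a comment iff bs is even.
--     bs = 0
--     for i, ch in enumerate(line):
--         if ch == "%" and bs % 2 == 0:
--             return line[:i].rstrip()
--         bs = bs + 1 if ch == "\\" else 0
--     return line
--
--
-- def _sanitize_lines_for_analysis(lines: List[str]) -> List[str]: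
--     out: List[str] = []
--     in_verbatim = False
--     for line in lines:
--         s = line.strip()
--         if in_verbatim:
--             if any(m in s for m in _END):
--                 in_verbatim = False
--             out.append("")
--         elif any(m in s for m in _BEGIN):
--             in_verbatim = True
--             out.append("")
--         else:
--             out.append(_strip_comment(line))
--     return out
-- ===== Notes on version B (the rewrite author's own statement) =====
-- stated objective: alternative
-- what changed: The comment stripper is a single forward parity scan keeping a running consecutive-backslash counter instead of A's backward backslash-count at every '%', and the verbatim state machine is restructured to branch on the state first.
import Mathlib
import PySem

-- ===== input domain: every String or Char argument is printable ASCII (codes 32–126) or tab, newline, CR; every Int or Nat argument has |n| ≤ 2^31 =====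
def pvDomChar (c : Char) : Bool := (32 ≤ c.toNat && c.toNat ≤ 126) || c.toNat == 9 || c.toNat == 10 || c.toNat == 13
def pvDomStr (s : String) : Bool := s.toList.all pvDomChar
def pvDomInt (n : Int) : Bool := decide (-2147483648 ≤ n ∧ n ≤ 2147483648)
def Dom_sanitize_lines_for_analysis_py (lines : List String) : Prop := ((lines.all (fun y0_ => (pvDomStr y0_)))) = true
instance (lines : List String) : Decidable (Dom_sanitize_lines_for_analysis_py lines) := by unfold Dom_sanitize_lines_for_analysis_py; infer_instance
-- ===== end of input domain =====

-- B replaces A's per-'%' backward backslash count by a single forward parity scan,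
-- and branches on the verbatim state first; same return value (alternative decomposition).

-- ===== PORT A =====

-- _strip_latex_comment: scan positions left to right; at each '%' run the backward
-- while-loop "while j >= 0 and line[j] == '\\'" — i.e. count the leading backslashes
-- of the reversed prefix — and cut there when the count is even.
def stripLatexCommentA_go (pre : List Char) : List Char → List Char
  | [] => pre
  | c :: rest =>
    if c = '%' then
      let bs := (pre.reverse.takeWhile (fun ch => ch == '\\')).length
      if bs % 2 = 1 then stripLatexCommentA_go (pre ++ [c]) rest
      else PySem.Chars.rstrip pre
    else stripLatexCommentA_go (pre ++ [c]) rest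

def stripLatexCommentA (line : String) : String :=
  String.ofList (stripLatexCommentA_go [] line.toList)

def sanitize_lines_for_analysis_py (lines : List String) : List String :=
  (lines.foldl (fun (st : Bool × List String) line =>
      -- st.1 = in_verbatim, st.2 = out, stripped = line.strip()
      if !st.1 &&
          (PySem.Str.isIn "\\begin{verbatim}" (PySem.Str.strip line)
            || PySem.Str.isIn "\\begin{lstlisting}" (PySem.Str.strip line)
            || PySem.Str.isIn "\\begin{minted}" (PySem.Str.strip line)) then
        (true, st.2 ++ [""])
      else if st.1 &&
          (PySem.Str.isIn "\\end{verbatim}" (PySem.Str.strip line)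
            || PySem.Str.isIn "\\end{lstlisting}" (PySem.Str.strip line)
            || PySem.Str.isIn "\\end{minted}" (PySem.Str.strip line)) then
        (false, st.2 ++ [""])
      else if st.1 then
        (st.1, st.2 ++ [""])
      else
        (st.1, st.2 ++ [stripLatexCommentA line]))
    (false, [])).2

-- ===== PORT B =====

def pvBeginMarkers : List String := ["\\begin{verbatim}", "\\begin{lstlisting}", "\\begin{minted}"]
def pvEndMarkers : List String := ["\\end{verbatim}", "\\end{lstlisting}", "\\end{minted}"]

-- _strip_comment: one forward pass, bs = running count of consecutive backslashes.
def stripCommentB_go (bs : Nat) (acc : List Char) : List Char → List Char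
  | [] => acc
  | c :: rest =>
    if c = '%' ∧ bs % 2 = 0 then PySem.Chars.rstrip acc
    else stripCommentB_go (if c = '\\' then bs + 1 else 0) (acc ++ [c]) rest

def stripCommentB (line : String) : String :=
  String.ofList (stripCommentB_go 0 [] line.toList)

def sanitizeB_go (in_verbatim : Bool) : List String → List String
  | [] => []
  | line :: rest =>
    let s := PySem.Str.strip line
    if in_verbatim then
      "" :: sanitizeB_go (if pvEndMarkers.any (fun m => PySem.Str.isIn m s) then false else true) rest
    else if pvBeginMarkers.any (fun m => PySem.Str.isIn m s) then
      "" :: sanitizeB_go true rest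
    else
      stripCommentB line :: sanitizeB_go false rest

def sanitize_lines_for_analysis_py_alt (lines : List String) : List String :=
  sanitizeB_go false lines

-- ===== PRECONDITION & SPEC =====
def Spec_sanitize_lines_for_analysis_py (lines : List String) (out : List String) : Prop := out = sanitize_lines_for_analysis_py_alt lines
instance (lines : List String) (out : List String) : Decidable (Spec_sanitize_lines_for_analysis_py lines out) := by unfold Spec_sanitize_lines_for_analysis_py; infer_instance

-- ===== CLAIM (what is proved, stated in full; the proofs are below) =====
def Claim_equal_sanitize_lines_for_analysis_py : Prop := ∀ (lines : List String), Dom_sanitize_lines_for_analysis_py lines → Spec_sanitize_lines_for_analysis_py lines (sanitize_lines_for_analysis_py lines)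

-- ===== LEMMAS AND PROOFS =====

-- Invariant tying B's running counter to A's backward count: bs is the length of the
-- run of backslashes at the end of the prefix scanned so far.
lemma strip_go_eq (rest : List Char) : ∀ pre : List Char,
    stripLatexCommentA_go pre rest
      = stripCommentB_go ((pre.reverse.takeWhile (fun ch => ch == '\\')).length) pre rest := by
  induction rest with
  | nil => intro pre; simp [stripLatexCommentA_go, stripCommentB_go]
  | cons c rest ih =>
    intro pre
    simp only [stripLatexCommentA_go, stripCommentB_go]
    by_cases hc : c = '%'
    · subst hc
      by_cases hodd : (pre.reverse.takeWhile (fun ch => ch == '\\')).length % 2 = 1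
      · rw [if_pos rfl, if_pos hodd, if_neg (by simp [hodd]), ih]
        simp
      · rw [if_pos rfl, if_neg hodd, if_pos ⟨rfl, by omega⟩]
    · rw [if_neg hc, if_neg (fun h => hc h.1), ih]
      by_cases hbs : c = '\\'
      · subst hbs; simp
      · simp [hbs]

lemma strip_eq (line : String) : stripLatexCommentA line = stripCommentB line := by
  simp [stripLatexCommentA, stripCommentB, strip_go_eq]

lemma sanitize_go_eq (lines : List String) : ∀ (inv : Bool) (out : List String),
    (lines.foldl (fun (st : Bool × List String) line =>
      -- st.1 = in_verbatim, st.2 = out, stripped = line.strip()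
      if !st.1 &&
          (PySem.Str.isIn "\\begin{verbatim}" (PySem.Str.strip line)
            || PySem.Str.isIn "\\begin{lstlisting}" (PySem.Str.strip line)
            || PySem.Str.isIn "\\begin{minted}" (PySem.Str.strip line)) then
        (true, st.2 ++ [""])
      else if st.1 &&
          (PySem.Str.isIn "\\end{verbatim}" (PySem.Str.strip line)
            || PySem.Str.isIn "\\end{lstlisting}" (PySem.Str.strip line)
            || PySem.Str.isIn "\\end{minted}" (PySem.Str.strip line)) then
        (false, st.2 ++ [""])
      else if st.1 then
        (st.1, st.2 ++ [""])
      else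
        (st.1, st.2 ++ [stripLatexCommentA line]))
      (inv, out)).2 = out ++ sanitizeB_go inv lines := by
  induction lines with
  | nil => intro inv out; simp [sanitizeB_go]
  | cons line rest ih =>
    intro inv out
    simp only [Bool.or_assoc] at ih
    simp only [List.foldl_cons, sanitizeB_go, pvBeginMarkers, pvEndMarkers, List.any_cons,
      List.any_nil, Bool.or_false, Bool.or_assoc]
    cases inv with
    | false =>
      simp only [Bool.not_false, Bool.true_and, Bool.false_and, Bool.false_eq_true, if_false]
      by_cases hb : (PySem.Str.isIn "\\begin{verbatim}" (PySem.Str.strip line)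
            || (PySem.Str.isIn "\\begin{lstlisting}" (PySem.Str.strip line)
            || PySem.Str.isIn "\\begin{minted}" (PySem.Str.strip line))) = true
      · simp only [hb, eq_self_iff_true, if_true]
        rw [ih]; simp
      · rw [Bool.not_eq_true] at hb
        simp only [hb, Bool.false_eq_true, if_false]
        rw [ih]
        simp [strip_eq]
    | true =>
      simp only [Bool.not_true, Bool.false_and, Bool.false_eq_true, if_false, Bool.true_and]
      by_cases he : (PySem.Str.isIn "\\end{verbatim}" (PySem.Str.strip line)
            || (PySem.Str.isIn "\\end{lstlisting}" (PySem.Str.strip line)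
            || PySem.Str.isIn "\\end{minted}" (PySem.Str.strip line))) = true
      · simp only [he, eq_self_iff_true, if_true]
        rw [ih]; simp
      · rw [Bool.not_eq_true] at he
        simp only [he, Bool.false_eq_true, if_false, eq_self_iff_true, if_true]
        rw [ih]; simp

-- ===== VERDICT (by name: the statement is the Claim_ definition above) =====
theorem sanitize_lines_for_analysis_py_spec : Claim_equal_sanitize_lines_for_analysis_py := by
  intro lines _
  show sanitize_lines_for_analysis_py lines = sanitize_lines_for_analysis_py_alt lines
  unfold sanitize_lines_for_analysis_py sanitize_lines_for_analysis_py_alt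
  rw [sanitize_go_eq]
  simp
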